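-- pv_equiv track=rewrite | github.com/KYUSEONGHAN/Development | 하루에 한개씩 문제 풀기/Python/BOJ/배열/10798.py | solve
-- ===== SOURCE A (Python) =====
-- def solve(data: list) -> str:
--     result = ''
--
--     for x in range(15):
--         for y in range(5):
--             # 배열의 범위를 벗어난 경우 예외처리
--             try:
--                 result += data[y][x]
--             except:
--                 pass
--
--     return result
-- ===== SOURCE B (Python) =====
-- def solve(data: list) -> str:
--     # Single row-major pass with per-column bucket accumulators:
--     # each cell is appended to its column's bucket while scanning the rows
--     # once in natural order; the 15 buckets joined give the column-major string.
--     buckets = [''] * 15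
--     for row in data[:5]:
--         for x, s in enumerate(row[:15]):
--             buckets[x] += s
--     return ''.join(buckets)
-- ===== Notes on version B (the rewrite author's own statement) =====
-- stated objective: alternative
-- what changed: Replaces A's column-major double loop with exception-probed cell access by a single row-major pass that appends each present cell into one of 15 per-column bucket accumulators, joined at the end.
import Mathlib
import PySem

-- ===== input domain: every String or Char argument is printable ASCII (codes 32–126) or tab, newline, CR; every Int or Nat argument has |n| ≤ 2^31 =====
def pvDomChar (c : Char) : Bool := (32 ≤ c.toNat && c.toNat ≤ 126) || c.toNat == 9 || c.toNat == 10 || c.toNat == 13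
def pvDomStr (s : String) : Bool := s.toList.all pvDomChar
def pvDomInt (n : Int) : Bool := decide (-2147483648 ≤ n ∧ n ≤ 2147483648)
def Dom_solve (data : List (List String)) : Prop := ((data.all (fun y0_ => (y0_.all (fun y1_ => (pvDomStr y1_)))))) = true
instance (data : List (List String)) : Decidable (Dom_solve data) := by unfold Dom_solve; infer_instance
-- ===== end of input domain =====

-- B replaces A's column-major double loop with exception-probed cell access by a
-- single row-major pass filling 15 per-column bucket accumulators, joined at the
-- end (objective: alternative algorithm, same result).

-- ===== PORT A =====
-- result += data[y][x] inside try/except: append only when both indexings succeed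
def solve (data : List (List String)) : String :=
  (PySem.List.pyRange 0 15 1).foldl (fun result x =>
    (PySem.List.pyRange 0 5 1).foldl (fun result y =>
      match (PySem.List.pyGet? data y).bind (fun row => PySem.List.pyGet? row x) with
      | some s => result ++ s
      | none => result) result) ""

-- ===== PORT B =====
-- buckets[x] += s : the enumerate index x is always 0 ≤ x < 15 = len(buckets),
-- so pySetD/pyGetD are exact here
def solve_alt (data : List (List String)) : String :=
  let buckets0 := List.replicate 15 ""
  let buckets := (PySem.List.slice data none (some 5)).foldl (fun bs row =>
    (PySem.List.enumerate (PySem.List.slice row none (some 15))).foldl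
      (fun bs p => PySem.List.pySetD bs p.1 (PySem.List.pyGetD bs p.1 "" ++ p.2)) bs) buckets0
  PySem.Str.join "" buckets

-- ===== PRECONDITION & SPEC =====
def Spec_solve (data : List (List String)) (out : String) : Prop := out = solve_alt data
instance (data : List (List String)) (out : String) : Decidable (Spec_solve data out) := by unfold Spec_solve; infer_instance

-- ===== CLAIM (what is proved, stated in full; the proofs are below) =====
def Claim_equal_solve : Prop := ∀ (data : List (List String)), Dom_solve data → Spec_solve data (solve data)

-- ===== LEMMAS AND PROOFS =====

-- the clipped grid both sides effectively read
def clipG (data : List (List String)) : List (List String) :=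
  (data.take 5).map (fun row => row.take 15)

-- the chars of column j of a (clipped) grid, top to bottom
def colL (R : List (List String)) (j : Nat) : List Char :=
  R.flatMap (fun r => ((r[j]?).getD "").toList)

-- B's inner-loop step
def bstep (bs : List String) (p : Int × String) : List String :=
  PySem.List.pySetD bs p.1 (PySem.List.pyGetD bs p.1 "" ++ p.2)

-- a foldl whose step appends a fixed chunk per element, seen on toList
theorem foldl_toList {α : Type} (step : String → α → String) (g : α → List Char)
    (hstep : ∀ r y, (step r y).toList = r.toList ++ g y) :
    ∀ (l : List α) (res : String),
      (l.foldl step res).toList = res.toList ++ l.flatMap g := by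
  intro l
  induction l with
  | nil => intro res; simp
  | cons y t ih => intro res; simp [List.foldl_cons, ih, hstep]

theorem join_empty : ∀ l : List (List Char), PySem.Chars.join [] l = l.flatten := by
  intro l
  induction l with
  | nil => rfl
  | cons a t ih =>
    cases t with
    | nil => simp [PySem.Chars.join, List.intercalate]
    | cons b u =>
      simp only [PySem.Chars.join, List.intercalate, List.intersperse_cons₂,
        List.flatten_cons] at *
      simp [ih]

theorem range_flatMap_opt {β γ : Type} (g : Option β → List γ) (hg : g none = []) :
    ∀ (n : Nat) (l : List β),
      (List.range n).flatMap (fun k => g l[k]?) = (l.take n).flatMap (fun b => g (some b)) := by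
  intro n
  induction n with
  | zero => intro l; simp
  | succ m ih =>
    intro l
    rw [List.range_succ, List.take_add_one]
    simp only [List.flatMap_append, ih]
    cases h : l[m]? with
    | none => simp [h, hg]
    | some b => simp [h]

-- effect of B's inner loop on bucket j
theorem inner_get : ∀ (r : List String) (n : Nat) (bs : List String) (j : Nat),
    ((PySem.List.enumerate r (n : Int)).foldl bstep bs)[j]? =
      (bs[j]?).map (fun b => b ++ (if n ≤ j then (r[j - n]?).getD "" else "")) := by
  intro r
  induction r with
  | nil =>
    intro n bs j
    simp only [PySem.List.enumerate_nil, List.foldl_nil, List.getElem?_nil,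
      Option.getD_none]
    cases h : bs[j]? with
    | none => simp
    | some b => simp
  | cons a t ih =>
    intro n bs j
    rw [PySem.List.enumerate_cons, List.foldl_cons]
    have hcast : (n : Int) + 1 = ((n + 1 : Nat) : Int) := by push_cast; ring
    rw [hcast, ih (n + 1)]
    have hb : bstep bs ((n : Int), a)
        = bs.set n ((bs.getD n "") ++ a) := by
      simp [bstep, PySem.List.pySetD_natCast, PySem.List.pyGetD_natCast]
    rw [hb]
    by_cases hjn : j = n
    · subst hjn
      by_cases hlen : j < bs.length
      · rw [List.getElem?_set_self' ]
        simp only [List.getElem?_eq_getElem hlen, Option.map_some]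
        have hgd : bs.getD j "" = bs[j] := List.getD_eq_getElem bs "" hlen
        have h1 : ¬ (j + 1 ≤ j) := by omega
        simp [h1, hlen]
      · have h1 : bs[j]? = none := List.getElem?_eq_none (by omega)
        rw [List.getElem?_set_self']
        simp [h1]
    · rw [List.getElem?_set_ne (by omega)]
      by_cases hlt : n ≤ j
      · have h1 : n + 1 ≤ j := by omega
        have h2 : j - n = (j - (n + 1)) + 1 := by omega
        simp [h1, hlt, h2]
      · have h1 : ¬ (n + 1 ≤ j) := by omega
        simp [h1, hlt]

-- effect of B's outer loop on bucket j, seen on toList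
theorem outer_get : ∀ (R : List (List String)) (bs : List String) (j : Nat),
    ((R.foldl (fun bs row => (PySem.List.enumerate row (0 : Int)).foldl bstep bs) bs)[j]?).map
        String.toList
      = (bs[j]?).map (fun b => b.toList ++ colL R j) := by
  intro R
  induction R with
  | nil =>
    intro bs j
    simp [colL]
  | cons r R' ih =>
    intro bs j
    rw [List.foldl_cons, ih]
    have h0 : ((0 : Nat) : Int) = (0 : Int) := rfl
    rw [← h0, inner_get r 0 bs j]
    cases h : bs[j]? with
    | none => simp
    | some b =>
      simp only [Option.map_some, Nat.zero_le, if_pos, Nat.sub_zero]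
      simp [colL, List.append_assoc]

-- B's buckets after the loop are exactly the 15 column strings
theorem buckets_eq (data : List (List String)) :
    (clipG data).foldl (fun bs row => (PySem.List.enumerate row (0 : Int)).foldl bstep bs)
        (List.replicate 15 "")
      = (List.range 15).map (fun j => String.ofList (colL (clipG data) j)) := by
  apply List.ext_getElem?
  intro j
  have h := outer_get (clipG data) (List.replicate 15 "") j
  by_cases hj : j < 15
  · rw [List.getElem?_replicate, if_pos hj] at h
    simp only [Option.map_some] at h
    have : ("" : String).toList ++ colL (clipG data) j = colL (clipG data) j := by simp
    rw [this] at h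
    cases hres : ((clipG data).foldl
        (fun bs row => (PySem.List.enumerate row (0 : Int)).foldl bstep bs)
        (List.replicate 15 ""))[j]? with
    | none => rw [hres] at h; simp at h
    | some s =>
      rw [hres] at h
      simp only [Option.map_some, Option.some.injEq] at h
      rw [List.getElem?_map, List.getElem?_range hj]
      simp only [Option.map_some, Option.some.injEq]
      rw [← h, String.ofList_toList]
  · rw [List.getElem?_replicate, if_neg hj] at h
    simp only [Option.map_none] at h
    rw [Option.map_eq_none_iff] at h
    rw [h, List.getElem?_map,
      List.getElem?_eq_none (by simpa using by omega : (List.range 15).length ≤ j)]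
    rfl

theorem solve_B_toList (data : List (List String)) :
    (solve_alt data).toList = (List.range 15).flatMap (fun j => colL (clipG data) j) := by
  unfold solve_alt
  have h5 : PySem.List.slice data none (some 5) = data.take 5 := by
    rw [PySem.List.slice_to data (by norm_num)]; rfl
  have h15 : ∀ row : List String,
      PySem.List.slice row none (some 15) = row.take 15 := by
    intro row; rw [PySem.List.slice_to row (by norm_num)]; rfl
  simp only [h5, h15]
  have hfold : (data.take 5).foldl (fun bs row =>
        (PySem.List.enumerate (row.take 15)).foldl
          (fun bs p => PySem.List.pySetD bs p.1 (PySem.List.pyGetD bs p.1 "" ++ p.2)) bs)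
        (List.replicate 15 "")
      = (clipG data).foldl
          (fun bs row => (PySem.List.enumerate row (0 : Int)).foldl bstep bs)
          (List.replicate 15 "") := by
    rw [clipG, List.foldl_map]
    rfl
  rw [hfold, buckets_eq]
  rw [PySem.Str.toList_join]
  have hnil : ("" : String).toList = [] := rfl
  rw [hnil, join_empty]
  rw [List.map_map]
  have : (String.toList ∘ fun j => String.ofList (colL (clipG data) j))
      = fun j => colL (clipG data) j := by
    funext j; simp [String.toList_ofList]
  rw [this, ← List.flatMap_def]

-- the char-list a cell of A contributes
def cellL (data : List (List String)) (y x : Int) : List Char :=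
  (((PySem.List.pyGet? data y).bind (fun row => PySem.List.pyGet? row x)).getD "").toList

theorem solve_A_toList (data : List (List String)) :
    (solve data).toList
      = (PySem.List.pyRange 0 15 1).flatMap (fun x =>
          (PySem.List.pyRange 0 5 1).flatMap (fun y => cellL data y x)) := by
  have hinner : ∀ (r : String) (x : Int),
      ((PySem.List.pyRange 0 5 1).foldl (fun result y =>
        match (PySem.List.pyGet? data y).bind (fun row => PySem.List.pyGet? row x) with
        | some s => result ++ s
        | none => result) r).toList
      = r.toList ++ (PySem.List.pyRange 0 5 1).flatMap (fun y => cellL data y x) := by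
    intro r x
    apply foldl_toList
    intro r' y
    unfold cellL
    cases h : (PySem.List.pyGet? data y).bind (fun row => PySem.List.pyGet? row x) with
    | some s => simp
    | none => simp
  unfold solve
  rw [foldl_toList _ _ (fun r x => hinner r x)]
  simp

-- A's column x equals colL of the clipped grid
theorem colA_eq (data : List (List String)) (x : Int) (hx0 : 0 ≤ x) (hx15 : x < 15) :
    (PySem.List.pyRange 0 5 1).flatMap (fun y => cellL data y x)
      = colL (clipG data) x.toNat := by
  have hL : (PySem.List.pyRange 0 5 1).flatMap (fun y => cellL data y x)
      = (data.take 5).flatMap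
          (fun row => ((PySem.List.pyGet? row x).getD "").toList) := by
    rw [PySem.List.pyRange_one]
    norm_num
    rw [List.flatMap_map]
    have := range_flatMap_opt
      (fun o : Option (List String) =>
        ((o.bind (fun row => PySem.List.pyGet? row x)).getD "").toList) rfl 5 data
    simp only [cellL, PySem.List.pyGet?_natCast]
    exact this
  rw [hL]
  unfold colL clipG
  rw [List.flatMap_map]
  apply List.flatMap_congr
  intro row _
  have hget : (row.take 15)[x.toNat]? = row[x.toNat]? :=
    List.getElem?_take_of_lt (by omega)
  rw [PySem.List.pyGet?_of_nonneg row hx0, hget]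

theorem solve_toList (data : List (List String)) :
    (solve data).toList = (solve_alt data).toList := by
  rw [solve_A_toList, solve_B_toList]
  have h15 : PySem.List.pyRange 0 15 1 = (List.range 15).map (fun k => Int.ofNat k) := by
    rw [PySem.List.pyRange_one]
    simp [Int.ofNat_eq_natCast]
  rw [h15, List.flatMap_map]
  apply List.flatMap_congr
  intro k hk
  have hk15 : k < 15 := List.mem_range.mp hk
  rw [show Int.ofNat k = (k : Int) from rfl,
    colA_eq data (k : Int) (by positivity) (by exact_mod_cast hk15)]
  norm_num

-- ===== VERDICT (by name: the statement is the Claim_ definition above) =====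
theorem solve_spec : Claim_equal_solve := by
  intro data _
  unfold Spec_solve
  exact String.toList_inj.mp (solve_toList data)
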